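-- pv_equiv track=rewrite | github.com/segnig/CodeForces | A2SV Contest Round #2/F_Array_Transformation.py | same_element_min_operation
-- ===== SOURCE A (Python) =====
-- from collections import defaultdict
--
-- def same_element_min_operation(arr):
--     counter = defaultdict(int)
--     feq_counter = defaultdict(int)
--
--     for element in arr:
--         counter[element] += 1
--         feq_counter[counter[element]] += 1
--
--     mx = 0
--     for freq in feq_counter:
--         mx = max(mx, freq * feq_counter[freq])
--
--     return len(arr) - mx
-- ===== SOURCE B (Python) =====
-- def same_element_min_operation(arr):
--     counts = {}
--     for v in arr:
--         counts[v] = counts.get(v, 0) + 1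
--     freqs = sorted(counts.values(), reverse=True)
--     mx = 0
--     for i, f in enumerate(freqs):
--         mx = max(mx, (i + 1) * f)
--     return len(arr) - mx
-- ===== Notes on version B (the rewrite author's own statement) =====
-- stated objective: alternative
-- what changed: A threads a frequency-of-frequency dict through the counting pass and maxes freq*feq_counter[freq] over its keys; B counts once into a plain dict, sorts the counts descending and takes the max of (i+1)*freqs[i] over the sorted list.
import Mathlib
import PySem

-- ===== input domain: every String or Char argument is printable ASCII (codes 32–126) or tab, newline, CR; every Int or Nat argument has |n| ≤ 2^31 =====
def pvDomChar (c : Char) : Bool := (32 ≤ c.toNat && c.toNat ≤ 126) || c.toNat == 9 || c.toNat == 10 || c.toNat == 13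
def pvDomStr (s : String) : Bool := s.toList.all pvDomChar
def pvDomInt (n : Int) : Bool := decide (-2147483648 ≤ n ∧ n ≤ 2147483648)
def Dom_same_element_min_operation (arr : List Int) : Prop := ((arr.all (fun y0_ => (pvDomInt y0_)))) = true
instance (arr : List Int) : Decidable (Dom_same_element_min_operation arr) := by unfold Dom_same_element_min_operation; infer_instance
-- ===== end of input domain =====

-- B replaces A's incrementally maintained frequency-of-frequency dict by sorting the final
-- counts descending and maxing (i+1)*freqs[i] — an alternative algorithm of similar cost.

-- ===== PORT A =====
-- one iteration of A's main loop: counter[element] += 1; feq_counter[counter[element]] += 1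
def pvStepA (st : PySem.Dict Int Int × PySem.Dict Int Int) (x : Int) :
    PySem.Dict Int Int × PySem.Dict Int Int :=
  let counter := st.1.modify x 0 (· + 1)
  let c := counter.getD x 0
  (counter, st.2.modify c 0 (· + 1))

def same_element_min_operation (arr : List Int) : Int :=
  let st := arr.foldl pvStepA (PySem.Dict.empty, PySem.Dict.empty)
  let mx := st.2.keys.foldl (fun mx freq => max mx (freq * st.2.getD freq 0)) 0
  (arr.length : Int) - mx

-- ===== PORT B =====
def same_element_min_operation_alt (arr : List Int) : Int :=
  let counts := arr.foldl (fun (d : PySem.Dict Int Int) v => d.insert v (d.getD v 0 + 1))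
    PySem.Dict.empty
  let freqs := PySem.List.sorted counts.values (fun c => c) true
  let mx := (PySem.List.enumerate freqs 0).foldl (fun mx p => max mx ((p.1 + 1) * p.2)) 0
  (arr.length : Int) - mx

-- ===== PRECONDITION & SPEC =====
def Spec_same_element_min_operation (arr : List Int) (out : Int) : Prop := out = same_element_min_operation_alt arr
instance (arr : List Int) (out : Int) : Decidable (Spec_same_element_min_operation arr out) := by unfold Spec_same_element_min_operation; infer_instance

-- ===== CLAIM (what is proved, stated in full; the proofs are below) =====
def Claim_equal_same_element_min_operation : Prop := ∀ (arr : List Int), Dom_same_element_min_operation arr → Spec_same_element_min_operation arr (same_element_min_operation arr)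

-- ===== LEMMAS AND PROOFS =====

-- number of distinct values of p whose multiplicity in p is at least f
def pvGz (p : List Int) (f : Nat) : Nat :=
  ((PySem.Set.ofList p).filter (fun v => decide (f ≤ p.count v))).length

lemma pvFstA (p : List Int) (st : PySem.Dict Int Int × PySem.Dict Int Int) :
    (p.foldl pvStepA st).1 = p.foldl (fun d x => d.modify x 0 (· + 1)) st.1 := by
  induction p generalizing st with
  | nil => rfl
  | cons a t ih => simp [pvStepA, ih]

lemma pvCounterA (p : List Int) :
    (p.foldl pvStepA (PySem.Dict.empty, PySem.Dict.empty)).1 = PySem.Dict.counter p := by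
  rw [pvFstA, PySem.Dict.counter_eq_foldl]

-- countP after changing the predicate at one distinct element
lemma pvCountP_update {α : Type} [DecidableEq α] (S : List α) (x : α) (q q' : α → Bool)
    (hS : S.Nodup) (hx : x ∈ S) (hne : ∀ v ∈ S, v ≠ x → q' v = q v) (hmono : q x = true → q' x = true) :
    S.countP q' = S.countP q + (if q' x = true ∧ ¬ q x = true then 1 else 0) := by
  induction S with
  | nil => cases hx
  | cons a t ih =>
    rw [List.nodup_cons] at hS
    rcases List.mem_cons.1 hx with heq | hxt
    · subst heq
      have ht : t.countP q' = t.countP q := by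
        apply List.countP_congr
        intro v hv
        rw [hne v (List.mem_cons_of_mem _ hv) (fun h => absurd (h ▸ hv) hS.1)]
      simp only [List.countP_cons, ht]
      by_cases hq : q x = true
      · simp [hq, hmono hq]
      · by_cases hq' : q' x = true <;> simp [hq, hq']
    · have ha : q' a = q a := hne a List.mem_cons_self (fun h => hS.1 (h ▸ hxt))
      rw [List.countP_cons, List.countP_cons, ha,
        ih hS.2 hxt (fun v hv => hne v (List.mem_cons_of_mem _ hv))]
      omega

lemma pvGz_append (p : List Int) (x : Int) (f : Nat) (hf : 1 ≤ f) :
    pvGz (p ++ [x]) f = pvGz p f + (if f = p.count x + 1 then 1 else 0) := by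
  unfold pvGz
  rw [← List.countP_eq_length_filter, ← List.countP_eq_length_filter]
  have hset : PySem.Set.ofList (p ++ [x]) = PySem.Set.add (PySem.Set.ofList p) x := by
    rw [PySem.Set.ofList_eq_foldl, PySem.Set.ofList_eq_foldl, List.foldl_append]
    rfl
  have hcx : (p ++ [x]).count x = p.count x + 1 := by
    rw [List.count_append]
    simp
  have hcne : ∀ v : Int, v ≠ x → (p ++ [x]).count v = p.count v := by
    intro v hv
    rw [List.count_append]
    simp [Ne.symm hv]
  rw [hset]
  by_cases hx : x ∈ PySem.Set.ofList p
  · have hadd : PySem.Set.add (PySem.Set.ofList p) x = PySem.Set.ofList p := by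
      simp [PySem.Set.add, hx]
    rw [hadd]
    rw [pvCountP_update (PySem.Set.ofList p) x (fun v => decide (f ≤ p.count v))
      (fun v => decide (f ≤ (p ++ [x]).count v)) (PySem.Set.nodup_ofList p) hx
      (fun v _ hvx => by simp only []; rw [hcne v hvx])
      (fun h => by simp only [decide_eq_true_eq, hcx] at h ⊢; omega)]
    congr 1
    simp only [decide_eq_true_eq, hcx]
    split_ifs with h1 h2 h2 <;> omega
  · have hadd : PySem.Set.add (PySem.Set.ofList p) x = PySem.Set.ofList p ++ [x] := by
      simp [PySem.Set.add, hx]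
    have hx' : x ∉ p := fun h => hx ((PySem.Set.mem_ofList p x).2 h)
    have hc0 : p.count x = 0 := List.count_eq_zero.2 hx'
    rw [hadd, List.countP_append]
    have h1 : (PySem.Set.ofList p).countP (fun v => decide (f ≤ (p ++ [x]).count v))
        = (PySem.Set.ofList p).countP (fun v => decide (f ≤ p.count v)) := by
      apply List.countP_congr
      intro v hv
      have hvx : v ≠ x := fun h => hx (h ▸ hv)
      rw [hcne v hvx]
    rw [h1]
    congr 1
    simp only [List.countP_cons, List.countP_nil, hcx, hc0, decide_eq_true_eq]
    split_ifs with h1 h2 h2 <;> omega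

lemma pvGz_zero (p : List Int) (f : Nat) (h : ∀ v ∈ p, p.count v < f) : pvGz p f = 0 := by
  unfold pvGz
  rw [List.length_eq_zero_iff, List.filter_eq_nil_iff]
  intro v hv
  have := h v ((PySem.Set.mem_ofList p v).1 hv)
  simp only [decide_eq_true_eq]
  omega

-- the invariant of A's main loop: feq_counter's items are (1, gz 1), …, (M, gz M)
lemma pvInvA (p : List Int) : ∃ M : Nat,
    ((p.foldl pvStepA (PySem.Dict.empty, PySem.Dict.empty)).2.items
      = (List.range' 1 M 1).map (fun (f : Nat) => ((f : Int), (pvGz p f : Int))))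
    ∧ ∀ v : Int, p.count v ≤ M := by
  induction p using List.reverseRecOn with
  | nil => exact ⟨0, rfl, by simp⟩
  | append_singleton p x ih =>
    obtain ⟨M, hit, hcnt⟩ := ih
    have hstep : List.foldl pvStepA (PySem.Dict.empty, PySem.Dict.empty) (p ++ [x])
        = pvStepA (List.foldl pvStepA (PySem.Dict.empty, PySem.Dict.empty) p) x := by
      rw [List.foldl_append]
      rfl
    set S := List.foldl pvStepA (PySem.Dict.empty, PySem.Dict.empty) p with hS
    have hkeys : S.2.keys = (List.range' 1 M 1).map (fun (f : Nat) => (f : Int)) := by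
      show S.2.items.map Prod.fst = _
      rw [hit, List.map_map]
      rfl
    have hnd : S.2.keys.Nodup := by
      rw [hkeys]
      exact (List.nodup_range').map (fun a b h => by exact_mod_cast h)
    have hcI : (S.1.modify x 0 (· + 1)).getD x 0 = ((p.count x + 1 : Nat) : Int) := by
      rw [PySem.Dict.getD_modify_self, hS, pvCounterA, PySem.Dict.getD_counter]
      push_cast
      ring
    simp only [PySem.Dict.modify] at hcI
    have hcx : (p ++ [x]).count x = p.count x + 1 := by
      rw [List.count_append]
      simp
    have hcne : ∀ v : Int, v ≠ x → (p ++ [x]).count v = p.count v := by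
      intro v hv
      rw [List.count_append]
      simp [Ne.symm hv]
    by_cases hc : p.count x + 1 ≤ M
    · have hmemk : ((p.count x + 1 : Nat) : Int) ∈ S.2.keys := by
        rw [hkeys]
        exact List.mem_map_of_mem (List.mem_range'_1.2 ⟨by omega, by omega⟩)
      have hcont : S.2.contains ((p.count x + 1 : Nat) : Int) = true :=
        (PySem.Dict.contains_iff_mem_keys _ _).2 hmemk
      have hgetD : S.2.getD ((p.count x + 1 : Nat) : Int) 0 = (pvGz p (p.count x + 1) : Int) := by
        apply PySem.Dict.getD_of_mem_items _ _ hnd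
        rw [hit]
        exact List.mem_map_of_mem (List.mem_range'_1.2 ⟨by omega, by omega⟩)
      refine ⟨M, ?_, ?_⟩
      · rw [hstep]
        simp only [pvStepA, PySem.Dict.modify]
        rw [hcI, hgetD, PySem.Dict.items_insert_of_contains _ _ hcont, hit, List.map_map]
        apply List.map_congr_left
        intro f hf
        rw [List.mem_range'_1] at hf
        simp only [Function.comp]
        by_cases hfc : f = p.count x + 1
        · subst hfc
          simp only [beq_self_eq_true, if_pos]
          have := pvGz_append p x (p.count x + 1) (by omega)
          rw [this]
          simp
        · have hbeq : (((f : Nat) : Int) == ((p.count x + 1 : Nat) : Int)) = false := by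
            simp only [beq_eq_false_iff_ne, ne_eq, Nat.cast_inj]
            exact hfc
          rw [hbeq]
          simp only [if_neg Bool.false_ne_true]
          have := pvGz_append p x f (by omega)
          rw [this, if_neg hfc]
          simp
      · intro v
        by_cases hv : v = x
        · subst hv
          rw [hcx]
          omega
        · rw [hcne v hv]
          exact le_trans (hcnt v) (by omega)
    · have hM : p.count x = M := le_antisymm (hcnt x) (by omega)
      have hnotmem : ((p.count x + 1 : Nat) : Int) ∉ S.2.keys := by
        rw [hkeys]
        intro hmem
        obtain ⟨g, hg, hgeq⟩ := List.mem_map.1 hmem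
        rw [List.mem_range'_1] at hg
        have : g = p.count x + 1 := by exact_mod_cast hgeq
        omega
      have hcont : S.2.contains ((p.count x + 1 : Nat) : Int) = false := by
        rw [PySem.Dict.contains_eq_decide_mem_keys]
        exact decide_eq_false hnotmem
      refine ⟨M + 1, ?_, ?_⟩
      · rw [hstep]
        simp only [pvStepA, PySem.Dict.modify]
        rw [hcI, PySem.Dict.getD_of_not_contains _ _ hcont,
          PySem.Dict.items_insert_of_not_contains _ _ hcont, hit, List.range'_concat,
          List.map_append]
        congr 1
        · apply List.map_congr_left
          intro f hf
          rw [List.mem_range'_1] at hf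
          have := pvGz_append p x f (by omega)
          rw [this, if_neg (by omega)]
          simp
        · have h1M : 1 + 1 * M = p.count x + 1 := by omega
          rw [h1M]
          have := pvGz_append p x (p.count x + 1) (by omega)
          rw [List.map_singleton, this, if_pos rfl, pvGz_zero p _ (fun v _ => by
            have := hcnt v
            omega)]
          simp
      · intro v
        by_cases hv : v = x
        · subst hv
          rw [hcx]
          omega
        · rw [hcne v hv]
          exact le_trans (hcnt v) (by omega)

-- A's second loop, rewritten over the invariant's item list
lemma pvMxA (p : List Int) (M : Nat)
    (hit : ((p.foldl pvStepA (PySem.Dict.empty, PySem.Dict.empty)).2.items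
      = (List.range' 1 M 1).map (fun (f : Nat) => ((f : Int), (pvGz p f : Int))))) :
    ((p.foldl pvStepA (PySem.Dict.empty, PySem.Dict.empty)).2.keys.foldl
        (fun mx freq => max mx (freq * (p.foldl pvStepA (PySem.Dict.empty, PySem.Dict.empty)).2.getD freq 0)) 0)
      = (List.range' 1 M 1).foldl (fun mx (f : Nat) => max mx ((f : Int) * ((pvGz p f : Nat) : Int))) 0 := by
  set S := List.foldl pvStepA (PySem.Dict.empty, PySem.Dict.empty) p with hS
  have hkeys : S.2.keys = (List.range' 1 M 1).map (fun (f : Nat) => (f : Int)) := by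
    show S.2.items.map Prod.fst = _
    rw [hit, List.map_map]
    rfl
  have hnd : S.2.keys.Nodup := by
    rw [hkeys]
    exact (List.nodup_range').map (fun a b h => by exact_mod_cast h)
  rw [hkeys, List.foldl_map]
  apply PySem.List.foldl_congr_mem
  intro acc f hf
  have hgetD : S.2.getD ((f : Nat) : Int) 0 = (pvGz p f : Int) := by
    apply PySem.Dict.getD_of_mem_items _ _ hnd
    rw [hit]
    exact List.mem_map_of_mem hf
  rw [hgetD]

lemma pvFoldlMaxLe {β : Type} (l : List β) (g : β → Int) (a b : Int) :
    l.foldl (fun m y => max m (g y)) a ≤ b ↔ a ≤ b ∧ ∀ y ∈ l, g y ≤ b := by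
  induction l generalizing a with
  | nil => simp
  | cons z t ih =>
    simp only [List.foldl_cons, ih, max_le_iff, List.mem_cons]
    constructor
    · rintro ⟨⟨h1, h2⟩, h3⟩
      exact ⟨h1, fun y hy => hy.elim (fun e => e ▸ h2) (h3 y)⟩
    · rintro ⟨h1, h2⟩
      exact ⟨⟨h1, h2 z (Or.inl rfl)⟩, fun y hy => h2 y (Or.inr hy)⟩

-- the core combinatorial fact: max over thresholds f of f·|{c ∈ C : c ≥ f}|
-- equals max over the descending sort L of C of (i+1)·L[i]
lemma pvCore (C : List Int) (M : Nat) (h1 : ∀ c ∈ C, 1 ≤ c) (hM : ∀ c ∈ C, c ≤ (M : Int)) :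
    (List.range' 1 M 1).foldl
        (fun mx (f : Nat) => max mx ((f : Int) * ((C.countP (fun c => decide ((f : Int) ≤ c)) : Nat) : Int))) 0
      = (PySem.List.enumerate (PySem.List.sorted C (fun c => c) true) 0).foldl
          (fun mx p => max mx ((p.1 + 1) * p.2)) 0 := by
  set L := PySem.List.sorted C (fun c => c) true with hL
  have hperm : L.Perm C := PySem.List.sorted_perm C (fun c => c) true
  have hpw : L.Pairwise (fun a b => b ≤ a) := PySem.List.sorted_pairwise_rev C (fun c => c)
  have hmono : ∀ (i j : Nat) (hij : i ≤ j) (hj : j < L.length),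
      L[j]'hj ≤ L[i]'(Nat.lt_of_le_of_lt hij hj) := by
    intro i j hij hj
    rcases Nat.lt_or_ge i j with h | h
    · exact (List.pairwise_iff_getElem.1 hpw) i j (Nat.lt_of_le_of_lt hij hj) hj h
    · have : i = j := by omega
      subst this
      exact le_refl _
  have hCL : ∀ f : Nat, C.countP (fun c => decide ((f : Int) ≤ c))
      = L.countP (fun c => decide ((f : Int) ≤ c)) := fun f => (hperm.countP_eq _).symm
  apply le_antisymm
  · rw [pvFoldlMaxLe]
    refine ⟨(PySem.List.le_foldl_max_int _ _ 0).1, ?_⟩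
    intro f hf
    rw [List.mem_range'_1] at hf
    rw [hCL]
    set k := L.countP (fun c => decide ((f : Int) ≤ c)) with hk
    rcases Nat.eq_zero_or_pos k with hk0 | hkpos
    · rw [hk0]
      simpa using (PySem.List.le_foldl_max_int (PySem.List.enumerate L 0)
        (fun p => (p.1 + 1) * p.2) 0).1
    · have hklen : k ≤ L.length := hk ▸ List.countP_le_length
      have hidx : k - 1 < L.length := by omega
      have hqk : (f : Int) ≤ L[k - 1] := by
        by_contra hlt
        rw [not_le] at hlt
        have hsplit : k = (L.take (k - 1)).countP (fun c => decide ((f : Int) ≤ c))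
            + (L.drop (k - 1)).countP (fun c => decide ((f : Int) ≤ c)) := by
          rw [hk, ← List.countP_append, List.take_append_drop]
        have hdrop : (L.drop (k - 1)).countP (fun c => decide ((f : Int) ≤ c)) = 0 := by
          rw [List.countP_eq_zero]
          intro y hy
          obtain ⟨t, ht, rfl⟩ := List.mem_iff_getElem.1 hy
          have hb : k - 1 + t < L.length := by
            rw [List.length_drop] at ht
            omega
          rw [List.getElem_drop]
          have hle := hmono (k - 1) (k - 1 + t) (by omega) hb
          simp only [decide_eq_true_eq]
          omega
        have htk : (L.take (k - 1)).countP (fun c => decide ((f : Int) ≤ c)) ≤ k - 1 := by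
          calc (L.take (k - 1)).countP (fun c => decide ((f : Int) ≤ c))
              ≤ (L.take (k - 1)).length := List.countP_le_length
            _ ≤ k - 1 := by simp [List.length_take]
        omega
      have hmem : (((0 : Int) + ((k - 1 : Nat) : Int)), L[k - 1]) ∈ PySem.List.enumerate L 0 :=
        (PySem.List.mem_enumerate_iff _ _ _).2 ⟨k - 1, hidx, rfl⟩
      have hle := (PySem.List.le_foldl_max_int (PySem.List.enumerate L 0)
        (fun p => (p.1 + 1) * p.2) 0).2 _ hmem
      simp only at hle
      have hcast : (0 : Int) + ((k - 1 : Nat) : Int) + 1 = (k : Int) := by omega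
      rw [hcast] at hle
      refine le_trans ?_ hle
      calc (f : Int) * (k : Int) ≤ L[k - 1] * (k : Int) :=
            mul_le_mul_of_nonneg_right hqk (by positivity)
        _ = (k : Int) * L[k - 1] := mul_comm _ _
  · rw [pvFoldlMaxLe]
    refine ⟨(PySem.List.le_foldl_max_int _ _ 0).1, ?_⟩
    intro pq hpq
    obtain ⟨k, hk, rfl⟩ := (PySem.List.mem_enumerate_iff _ _ _).1 hpq
    have hLkC : L[k] ∈ C := hperm.mem_iff.1 (List.getElem_mem hk)
    have h1k := h1 _ hLkC
    have hMk := hM _ hLkC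
    have hfI : ((L[k].toNat : Nat) : Int) = L[k] := Int.toNat_of_nonneg (by omega)
    have hfr : L[k].toNat ∈ List.range' 1 M 1 := List.mem_range'_1.2 ⟨by omega, by omega⟩
    have hcount : k + 1 ≤ L.countP (fun c => decide ((L[k].toNat : Int) ≤ c)) := by
      have htake : (L.take (k + 1)).countP (fun c => decide ((L[k].toNat : Int) ≤ c))
          = (L.take (k + 1)).length := by
        rw [List.countP_eq_length]
        intro y hy
        obtain ⟨t, ht, rfl⟩ := List.mem_iff_getElem.1 hy
        have htk : t ≤ k := by
          rw [List.length_take] at ht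
          omega
        rw [List.getElem_take]
        have hle := hmono t k htk hk
        simp only [decide_eq_true_eq]
        omega
      have hlen : (L.take (k + 1)).length = k + 1 := by
        simp [List.length_take]
        omega
      have hsplit : L.countP (fun c => decide ((L[k].toNat : Int) ≤ c))
          = (L.take (k + 1)).countP (fun c => decide ((L[k].toNat : Int) ≤ c))
          + (L.drop (k + 1)).countP (fun c => decide ((L[k].toNat : Int) ≤ c)) := by
        rw [← List.countP_append, List.take_append_drop]
      omega
    have hterm := (PySem.List.le_foldl_max_int (List.range' 1 M 1)
      (fun f : Nat => (f : Int) * ((C.countP (fun c => decide ((f : Int) ≤ c)) : Nat) : Int)) 0).2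
      _ hfr
    simp only at hterm
    refine le_trans ?_ hterm
    rw [hCL]
    calc ((0 : Int) + (k : Nat) + 1) * L[k] = L[k] * ((k : Nat) + 1 : Int) := by ring
      _ ≤ L[k] * ((L.countP (fun c => decide ((L[k].toNat : Int) ≤ c)) : Nat) : Int) := by
          apply mul_le_mul_of_nonneg_left _ (by omega)
          exact_mod_cast hcount
      _ = ((L[k].toNat : Nat) : Int) * ((L.countP (fun c => decide ((L[k].toNat : Int) ≤ c)) : Nat) : Int) := by
          rw [hfI]

lemma pvGz_countP (p : List Int) (f : Nat) :
    (pvGz p f : Int)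
      = (((PySem.Set.ofList p).map (fun k => ((p.count k : Nat) : Int))).countP
          (fun c => decide ((f : Int) ≤ c)) : Nat) := by
  unfold pvGz
  rw [List.countP_map]
  congr 1
  rw [← List.countP_eq_length_filter]
  apply List.countP_congr
  intro v _
  simp [Function.comp]

-- ===== VERDICT (by name: the statement is the Claim_ definition above) =====
theorem same_element_min_operation_spec : Claim_equal_same_element_min_operation := by
  intro arr _
  simp only [Spec_same_element_min_operation, same_element_min_operation, same_element_min_operation_alt]
  obtain ⟨M, hit, hcnt⟩ := pvInvA arr
  rw [pvMxA arr M hit, PySem.Dict.foldl_insert_getD_add_one_eq_counter]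
  have hval : (PySem.Dict.counter arr).values
      = (PySem.Set.ofList arr).map (fun k => ((arr.count k : Nat) : Int)) := by
    show (PySem.Dict.counter arr).items.map Prod.snd = _
    rw [PySem.Dict.items_counter, List.map_map]
    rfl
  rw [hval]
  congr 1
  have h1 : ∀ c ∈ (PySem.Set.ofList arr).map (fun k => ((arr.count k : Nat) : Int)), 1 ≤ c := by
    intro c hc
    obtain ⟨k, hk, rfl⟩ := List.mem_map.1 hc
    have : k ∈ arr := (PySem.Set.mem_ofList arr k).1 hk
    have := List.count_pos_iff.2 this
    omega
  have h2 : ∀ c ∈ (PySem.Set.ofList arr).map (fun k => ((arr.count k : Nat) : Int)), c ≤ (M : Int) := by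
    intro c hc
    obtain ⟨k, hk, rfl⟩ := List.mem_map.1 hc
    have := hcnt k
    omega
  rw [← pvCore _ M h1 h2]
  apply PySem.List.foldl_congr_mem
  intro acc f hf
  rw [pvGz_countP]
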